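-- pv_equiv track=rewrite | github.com/nikhil8052/Data-Structures | Python-ProblemSolving/series/number-series-1.py | printSeries
-- ===== SOURCE A (Python) =====
-- def printSeries(n):
--     i,j=(-1,-1)
--     arr=[]
--     for num in range (1, n+1 ):
--         if(num%2==1):
--             i=i+1
--             arr.append(pow(2,i))
--         else :
--             j=j+1
--             arr.append(pow(3,j))
--     return arr
-- ===== SOURCE B (Python) =====
-- def printSeries(n):
--     twos = [2 ** i for i in range((n + 1) // 2)]
--     threes = [3 ** j for j in range(n // 2)]
--     out = []
--     for a, b in zip(twos, threes):
--         out.append(a)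
--         out.append(b)
--     if len(twos) > len(threes):
--         out.append(twos[-1])
--     return out
-- ===== Notes on version B (the rewrite author's own statement) =====
-- stated objective: alternative
-- what changed: B generates the power-of-2 and power-of-3 subsequences as two independent comprehensions and interleaves them (with a trailing 2-power for odd n), replacing A's single parity-branching loop with two running counters.
import Mathlib
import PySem

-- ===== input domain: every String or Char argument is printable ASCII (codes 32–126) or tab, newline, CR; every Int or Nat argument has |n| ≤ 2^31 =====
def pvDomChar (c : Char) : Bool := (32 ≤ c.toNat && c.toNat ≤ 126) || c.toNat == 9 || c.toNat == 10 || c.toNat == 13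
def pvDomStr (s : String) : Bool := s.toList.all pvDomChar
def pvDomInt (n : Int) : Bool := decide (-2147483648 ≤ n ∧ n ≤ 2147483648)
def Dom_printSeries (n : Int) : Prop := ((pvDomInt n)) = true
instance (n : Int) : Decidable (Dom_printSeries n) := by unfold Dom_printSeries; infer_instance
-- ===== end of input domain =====

-- B builds the power-of-2 and power-of-3 subsequences separately and interleaves them,
-- instead of A's single parity-branching loop with two counters (objective: alternative decomposition).

-- ===== PORT A =====
-- one loop step of A: (i, j, arr) updated according to the parity of num
def stepA (st : Int × Int × List Int) (num : Int) : Int × Int × List Int :=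
  if PySem.Int.mod num 2 = 1 then (st.1 + 1, st.2.1, st.2.2 ++ [(2:Int) ^ (st.1 + 1).toNat])
  else (st.1, st.2.1 + 1, st.2.2 ++ [(3:Int) ^ (st.2.1 + 1).toNat])

def printSeries (n : Int) : List Int :=
  ((PySem.List.pyRange 1 (n + 1) 1).foldl stepA (-1, -1, [])).2.2

-- ===== PORT B =====
-- range(m) for the comprehensions is List.range m.toNat (empty when m ≤ 0, as in Python)
def printSeries_alt (n : Int) : List Int :=
  let twos := (List.range (PySem.Int.floordiv (n + 1) 2).toNat).map (fun i => (2:Int) ^ i)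
  let threes := (List.range (PySem.Int.floordiv n 2).toNat).map (fun j => (3:Int) ^ j)
  let out := (twos.zip threes).foldl (fun acc p => acc ++ [p.1, p.2]) []
  if threes.length < twos.length then out ++ [twos.getLast?.getD 0] else out

-- ===== PRECONDITION & SPEC =====
def Spec_printSeries (n : Int) (out : List Int) : Prop := out = printSeries_alt n
instance (n : Int) (out : List Int) : Decidable (Spec_printSeries n out) := by unfold Spec_printSeries; infer_instance

-- ===== CLAIM (what is proved, stated in full; the proofs are below) =====
def Claim_equal_printSeries : Prop := ∀ (n : Int), Dom_printSeries n → Spec_printSeries n (printSeries n)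

-- ===== LEMMAS AND PROOFS =====

-- reference series: element m (0-based) is 2^(m/2) if m is even, else 3^(m/2)
def refSeries : Nat → List Int
  | 0 => []
  | m + 1 => refSeries m ++ [(if (m + 1) % 2 = 1 then (2:Int) else 3) ^ (m / 2)]

lemma foldA (m : Nat) :
    (PySem.List.pyRange 1 ((m : Int) + 1) 1).foldl stepA (-1, -1, []) =
      ((((m + 1) / 2 : Nat) : Int) - 1, ((m / 2 : Nat) : Int) - 1, refSeries m) := by
  induction m with
  | zero => simp [PySem.List.pyRange_one_eq_nil, refSeries]
  | succ m ih =>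
      have h1 : (1 : Int) ≤ (m : Int) + 1 := by omega
      have hr : PySem.List.pyRange 1 ((m : Int) + 1 + 1) 1 =
          PySem.List.pyRange 1 ((m : Int) + 1) 1 ++ [(m : Int) + 1] :=
        PySem.List.pyRange_one_succ_right h1
      push_cast
      rw [hr, List.foldl_append, ih]
      have hmod : PySem.Int.mod ((m : Int) + 1) 2 = (((m + 1) % 2 : Nat) : Int) := by
        have := PySem.Int.mod_natCast (m + 1) 2
        push_cast at this ⊢
        exact_mod_cast this
      rcases Nat.even_or_odd m with ⟨k, hk⟩ | ⟨k, hk⟩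
      · subst hk
        have hpar : ((k + k + 1) % 2 : Nat) = 1 := by omega
        rw [hpar] at hmod
        have h2 : refSeries (k + k + 1) = refSeries (k + k) ++ [(2:Int) ^ ((k + k) / 2)] := by
          simp [refSeries, hpar]
        rw [h2]
        push_cast at hmod ⊢
        unfold stepA
        simp only [List.foldl_cons, List.foldl_nil]
        rw [if_pos hmod]
        simp only [Prod.mk.injEq]
        refine ⟨by omega, by omega, ?_⟩
        have he : (((k:Int) + ↑k + 1) / 2 - 1 + 1).toNat = (k + k) / 2 := by omega
        rw [he]
      · subst hk
        have hpar : ((2 * k + 1 + 1) % 2 : Nat) = 0 := by omega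
        rw [hpar] at hmod
        have hpar2 : (2 * k + 1) % 2 = 1 := by omega
        have h2 : refSeries (2 * k + 1 + 1) = refSeries (2 * k + 1) ++ [(3:Int) ^ ((2 * k + 1) / 2)] := by
          simp [refSeries, hpar]
        rw [h2]
        push_cast at hmod ⊢
        unfold stepA
        simp only [List.foldl_cons, List.foldl_nil]
        rw [if_neg (by rw [hmod]; norm_num)]
        simp only [Prod.mk.injEq]
        refine ⟨by omega, by omega, ?_⟩
        have he : ((2 * (k:Int) + 1) / 2 - 1 + 1).toNat = (2 * k + 1) / 2 := by omega
        rw [he]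
  
lemma zipflat (k : Nat) :
    ((((List.range k).map (fun i => (2:Int) ^ i)).zip
        ((List.range k).map (fun j => (3:Int) ^ j))).foldl
      (fun acc p => acc ++ [p.1, p.2]) []) = refSeries (2 * k) := by
  induction k with
  | zero => simp [refSeries]
  | succ k ih =>
      rw [List.range_succ, List.map_append, List.map_append,
        List.zip_append (by simp), List.foldl_append, ih]
      have h2 : 2 * (k + 1) = (2 * k + 1) + 1 := by omega
      rw [h2]
      have e1 : (2 * k + 1 + 1) % 2 = 0 := by omega
      have e2 : (2 * k + 1) % 2 = 1 := by omega
      have e3 : (2 * k + 1) / 2 = k := by omega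
      have e4 : (2 * k) / 2 = k := by omega
      simp [refSeries, e1, e2, e3, e4]

lemma altNat (m : Nat) : printSeries_alt (m : Int) = refSeries m := by
  have hf1 : (PySem.Int.floordiv ((m : Int) + 1) 2).toNat = (m + 1) / 2 := by
    have := PySem.Int.floordiv_natCast (m + 1) 2
    push_cast at this
    omega
  have hf2 : (PySem.Int.floordiv (m : Int) 2).toNat = m / 2 := by
    have := PySem.Int.floordiv_natCast m 2
    push_cast at this
    omega
  unfold printSeries_alt
  rw [hf1, hf2]
  rcases Nat.even_or_odd m with ⟨k, hk⟩ | ⟨k, hk⟩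
  · subst hk
    have e1 : (k + k + 1) / 2 = k := by omega
    have e2 : (k + k) / 2 = k := by omega
    have e3 : k + k = 2 * k := by omega
    simp only [e1, e2]
    simp only [List.length_map, List.length_range]
    rw [if_neg (lt_irrefl k), e3, zipflat]
  · subst hk
    have e1 : (2 * k + 1 + 1) / 2 = k + 1 := by omega
    have e2 : (2 * k + 1) / 2 = k := by omega
    simp only [e1, e2]
    rw [List.range_succ, List.map_append]
    simp only [List.map_cons, List.map_nil]
    rw [show ((List.range k).map (fun j => (3:Int) ^ j)) =
        ((List.range k).map (fun j => (3:Int) ^ j)) ++ [] by simp]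
    rw [List.zip_append (by simp)]
    simp only [List.zip_nil_right, List.append_nil]
    rw [zipflat]
    have hlen : ((List.range k).map (fun j => (3:Int) ^ j)).length <
        (((List.range k).map (fun i => (2:Int) ^ i)) ++ [(2:Int) ^ k]).length := by simp
    rw [if_pos hlen]
    have hlast : ((((List.range k).map (fun i => (2:Int) ^ i)) ++ [(2:Int) ^ k]).getLast?).getD 0
        = (2:Int) ^ k := by simp
    rw [hlast]
    have e3 : (2 * k + 1) % 2 = 1 := by omega
    simp [refSeries, e3]

-- ===== VERDICT (by name: the statement is the Claim_ definition above) =====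
theorem printSeries_spec : Claim_equal_printSeries := by
  intro n _
  unfold Spec_printSeries
  rcases (show n ≤ 0 ∨ 0 < n by omega) with hn | hn
  · have hA : PySem.List.pyRange 1 (n + 1) 1 = [] :=
      PySem.List.pyRange_one_eq_nil (by omega)
    have h1 : (PySem.Int.floordiv (n + 1) 2).toNat = 0 := by
      have := PySem.Int.le_floordiv_iff_mul_le (a := n + 1) (b := 2) (q := 1) (by norm_num)
      omega
    have h2 : (PySem.Int.floordiv n 2).toNat = 0 := by
      have := PySem.Int.le_floordiv_iff_mul_le (a := n) (b := 2) (q := 1) (by norm_num)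
      omega
    simp only [printSeries, printSeries_alt]
    rw [h1, h2]
    simp [hA]
  · obtain ⟨m, rfl⟩ : ∃ m : Nat, n = (m : Int) := ⟨n.toNat, by omega⟩
    rw [altNat]
    unfold printSeries
    rw [foldA]
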